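-- pv_equiv track=rewrite | github.com/Hilopio/PRIMO | src/blending_functions.py | calculate_pyramid_sizes
-- ===== SOURCE A (Python) =====
-- from typing import List, Tuple
--
-- def calculate_pyramid_sizes(width: int, height: int, levels: int) -> List[Tuple[int, int]]:
--     """
--     Вычисляет размеры для каждого уровня пирамиды.
--     pyrDown делает размер (w // 2 + w % 2, h // 2 + h % 2)
--     """
--     sizes = [(width, height)]
--     w, h = width, height
--
--     for _ in range(levels - 1):
--         w = w // 2 + w % 2
--         h = h // 2 + h % 2
--         sizes.append((w, h))
--
--     return sizes
-- ===== SOURCE B (Python) =====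
-- def calculate_pyramid_sizes(width, height, levels):
--     return [(-(-width >> i), -(-height >> i)) for i in range(max(1, levels))]
-- ===== Notes on version B (the rewrite author's own statement) =====
-- stated objective: simpler
-- what changed: Each pyramid level is computed independently by the closed form ceil(x/2^i), written -(-x >> i), over range(max(1, levels)), instead of threading a running (w, h) through A's sequential halving recurrence.
import Mathlib
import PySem

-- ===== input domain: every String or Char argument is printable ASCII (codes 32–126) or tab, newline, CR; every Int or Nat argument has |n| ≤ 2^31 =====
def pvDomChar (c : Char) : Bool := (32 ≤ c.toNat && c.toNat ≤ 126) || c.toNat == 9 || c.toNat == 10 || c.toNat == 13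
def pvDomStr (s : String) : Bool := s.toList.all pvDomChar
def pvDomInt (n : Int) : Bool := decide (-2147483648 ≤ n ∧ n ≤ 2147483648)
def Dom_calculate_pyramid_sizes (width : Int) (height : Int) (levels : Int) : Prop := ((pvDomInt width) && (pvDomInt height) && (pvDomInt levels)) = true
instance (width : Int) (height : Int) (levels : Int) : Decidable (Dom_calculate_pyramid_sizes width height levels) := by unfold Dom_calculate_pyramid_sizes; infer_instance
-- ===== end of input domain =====

-- B computes every pyramid level independently by the closed form ceil(x/2^i) = -((-x) >> i)
-- over range(max(1, levels)), instead of A's sequential halving recurrence; objective: simpler.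

-- ===== PORT A =====
def calculate_pyramid_sizes (width : Int) (height : Int) (levels : Int) : List (Int × Int) :=
  ((PySem.List.pyRange 0 (levels - 1) 1).foldl
    (fun (st : Int × Int × List (Int × Int)) _ =>
      let w := PySem.Int.floordiv st.1 2 + PySem.Int.mod st.1 2
      let h := PySem.Int.floordiv st.2.1 2 + PySem.Int.mod st.2.1 2
      (w, h, st.2.2 ++ [(w, h)]))
    (width, height, [(width, height)])).2.2

-- ===== PORT B =====
def calculate_pyramid_sizes_alt (width : Int) (height : Int) (levels : Int) : List (Int × Int) :=
  (PySem.List.pyRange 0 (max 1 levels) 1).map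
    (fun i => (-((-width) >>> i.toNat), -((-height) >>> i.toNat)))

-- ===== PRECONDITION & SPEC =====
def Spec_calculate_pyramid_sizes (width : Int) (height : Int) (levels : Int) (out : List (Int × Int)) : Prop := out = calculate_pyramid_sizes_alt width height levels
instance (width : Int) (height : Int) (levels : Int) (out : List (Int × Int)) : Decidable (Spec_calculate_pyramid_sizes width height levels out) := by unfold Spec_calculate_pyramid_sizes; infer_instance

-- ===== CLAIM (what is proved, stated in full; the proofs are below) =====
def Claim_equal_calculate_pyramid_sizes : Prop := ∀ (width : Int) (height : Int) (levels : Int), Dom_calculate_pyramid_sizes width height levels → Spec_calculate_pyramid_sizes width height levels (calculate_pyramid_sizes width height levels)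

-- ===== LEMMAS AND PROOFS =====

/-- ceil(x / 2^i), the value of pyramid level `i`. -/
def pvCeil (x : Int) (i : Nat) : Int := -(PySem.Int.floordiv (-x) (2 ^ i))

lemma pvCeil_zero (x : Int) : pvCeil x 0 = x := by
  simp [pvCeil]

/-- one pyrDown step on a level value gives the next level value -/
lemma step_pvCeil (x : Int) (i : Nat) :
    PySem.Int.floordiv (pvCeil x i) 2 + PySem.Int.mod (pvCeil x i) 2 = pvCeil x (i + 1) := by
  have h2 : (0 : Int) < 2 := by omega
  have hp : (0 : Int) < 2 ^ i := by positivity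
  simp only [pvCeil, PySem.Int.floordiv_eq_ediv_of_pos h2, PySem.Int.mod_eq_emod_of_pos h2,
    PySem.Int.floordiv_eq_ediv_of_pos hp,
    PySem.Int.floordiv_eq_ediv_of_pos (show (0:Int) < 2 ^ (i+1) by positivity)]
  have key : (-x) / 2 ^ i / 2 = (-x) / 2 ^ (i + 1) := by
    rw [Int.ediv_ediv_of_nonneg (le_of_lt hp), pow_succ]
  omega

/-- the fold of A over any list of length n, starting at level i with accumulator acc -/
lemma foldA_spec (wd ht : Int) (n : Nat) : ∀ (i : Nat) (acc : List (Int × Int)),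
    (List.range n).foldl
      (fun (st : Int × Int × List (Int × Int)) _ =>
        let w := PySem.Int.floordiv st.1 2 + PySem.Int.mod st.1 2
        let h := PySem.Int.floordiv st.2.1 2 + PySem.Int.mod st.2.1 2
        (w, h, st.2.2 ++ [(w, h)]))
      (pvCeil wd i, pvCeil ht i, acc)
    = (pvCeil wd (i + n), pvCeil ht (i + n),
       acc ++ (List.range n).map (fun j => (pvCeil wd (i + 1 + j), pvCeil ht (i + 1 + j)))) := by
  induction n with
  | zero => simp
  | succ n ih =>
    intro i acc
    rw [List.range_succ, List.foldl_append, ih i acc]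
    simp only [List.foldl_cons, List.foldl_nil, step_pvCeil, List.map_append,
      List.map_cons, List.map_nil, List.append_assoc]
    refine congrArg₂ _ (by ring_nf) (congrArg₂ _ (by ring_nf) ?_)
    simp [Nat.add_assoc, Nat.add_comm, Nat.add_left_comm]

/-- port B's per-level term is the level value -/
lemma alt_term (x : Int) (k : Nat) :
    -((-x) >>> ((((0:Int) + (k:Int)).toNat : Nat) : Int)) = pvCeil x k := by
  have hk : ((0:Int) + (k:Int)).toNat = k := by omega
  rw [hk, Int.shiftRight_natCast_right, Int.shiftRight_eq_div_pow, pvCeil,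
    PySem.Int.floordiv_eq_ediv_of_pos (show (0:Int) < 2 ^ k by positivity)]
  norm_cast

-- ===== VERDICT (by name: the statement is the Claim_ definition above) =====
theorem calculate_pyramid_sizes_spec : Claim_equal_calculate_pyramid_sizes := by
  intro width height levels _
  unfold Spec_calculate_pyramid_sizes calculate_pyramid_sizes calculate_pyramid_sizes_alt
  rw [PySem.List.pyRange_one 0 (levels - 1), PySem.List.pyRange_one 0 (max 1 levels)]
  set n : Nat := (levels - 1 - 0).toNat with hn
  have hm : (max 1 levels - 0).toNat = n + 1 := by omega
  rw [hm, List.foldl_map, List.map_map]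
  conv_lhs => rw [(pvCeil_zero width).symm, (pvCeil_zero height).symm]
  rw [foldA_spec width height n 0 [(pvCeil width 0, pvCeil height 0)]]
  rw [List.range_succ_eq_map, List.map_cons, List.map_map]
  simp only [List.singleton_append]
  congr 1
  · simp only [Function.comp_apply]
    exact (congrArg₂ Prod.mk (alt_term width 0) (alt_term height 0)).symm
  · refine List.map_congr_left (fun j _ => ?_)
    have h01 : 0 + 1 + j = j + 1 := by omega
    rw [h01]
    simp only [Function.comp_apply]
    exact (congrArg₂ Prod.mk (alt_term width (j+1)) (alt_term height (j+1))).symm
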